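-- pv_equiv track=rewrite | github.com/arsham-aazami/python-project | ex3/robot_path.py | robot_path
-- ===== SOURCE A (Python) =====
-- def robot_path(destination_list):
-- 	"""
-- 	(list) -> boolean
-- 	:param destination_list: a list containing the directions that robot passed
-- 	:return: boolean
-- 	"""
-- 	num_of_n = 0
-- 	num_of_s = 0
-- 	num_of_e = 0
-- 	num_of_w = 0
--
-- 	# The robot can only pass these two destinations
-- 	# ["e", "n", "e", "e", "n"],
-- 	# ["w", "n", "w", "n", "w", "w", "n"]
--
--     # we can explain that robot goes to the east for 3 times and north for 2 times in destination NO. 1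
-- 	east_count_des1 = 3
-- 	north_count_des1 = 2
--
-- 	# we can explain that robot goes to the north for three times and north for 4 times in destination NO. 2
-- 	north_count_des2 = 3
-- 	west_count_des2 = 4
--
-- 	# obtaining the number of direction the robot pass to arrive the specified destination
-- 	for direction in destination_list:
-- 		if direction == "n": num_of_n += 1
-- 		elif direction == "s": num_of_s += 1
-- 		elif direction == "e": num_of_e += 1
-- 		elif direction == "w": num_of_w += 1
--
-- 	if (num_of_n == north_count_des1 and num_of_e == east_count_des1) or (
-- 			num_of_w == west_count_des2 and num_of_n == north_count_des2):
-- 		return True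
-- 	else:
-- 		return False
-- ===== SOURCE B (Python) =====
-- def _reaches(moves, a_dir, a_need, b_dir, b_need):
--     # Consume the move budgets for the two relevant directions; fail as soon
--     # as either budget is exceeded; succeed iff both are used up exactly.
--     for d in moves:
--         if d == a_dir:
--             if a_need == 0:
--                 return False
--             a_need -= 1
--         elif d == b_dir:
--             if b_need == 0:
--                 return False
--             b_need -= 1
--     return a_need == 0 and b_need == 0
--
--
-- def robot_path(destination_list):
--     return (_reaches(destination_list, "n", 2, "e", 3)
--             or _reaches(destination_list, "w", 4, "n", 3))
-- ===== Notes on version B (the rewrite author's own statement) =====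
-- stated objective: alternative
-- what changed: Replaces A's single-pass four-counter accumulation with a generic budget-consuming matcher: for each of the two candidate destinations it scans the list decrementing the required move budgets, aborts early as soon as a budget is exceeded, and accepts iff both budgets end exactly at zero; the second pass is skipped by short-circuit when the first succeeds.
import Mathlib
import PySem

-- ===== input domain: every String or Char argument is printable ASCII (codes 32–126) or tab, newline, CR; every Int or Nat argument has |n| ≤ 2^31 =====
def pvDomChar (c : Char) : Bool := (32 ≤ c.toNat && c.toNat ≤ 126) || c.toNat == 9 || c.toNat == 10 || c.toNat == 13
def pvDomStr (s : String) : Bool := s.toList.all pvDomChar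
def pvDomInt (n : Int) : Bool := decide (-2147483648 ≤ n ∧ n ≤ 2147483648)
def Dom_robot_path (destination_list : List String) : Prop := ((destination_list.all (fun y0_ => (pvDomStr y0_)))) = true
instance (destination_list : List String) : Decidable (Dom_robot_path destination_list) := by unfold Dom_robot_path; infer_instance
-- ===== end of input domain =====

-- B replaces A's four-counter accumulation loop with an early-exit budget-consuming
-- matcher run (short-circuited) once per candidate destination; same return value.

-- ===== PORT A =====
def robotStepA (st : Int × Int × Int × Int) (direction : String) : Int × Int × Int × Int :=
  let (n, s, e, w) := st
  if direction == "n" then (n + 1, s, e, w)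
  else if direction == "s" then (n, s + 1, e, w)
  else if direction == "e" then (n, s, e + 1, w)
  else if direction == "w" then (n, s, e, w + 1)
  else (n, s, e, w)

def robot_path (destination_list : List String) : Bool :=
  let st := destination_list.foldl robotStepA (0, 0, 0, 0)
  let (num_of_n, _num_of_s, num_of_e, num_of_w) := st
  if (num_of_n == 2 && num_of_e == 3) || (num_of_w == 4 && num_of_n == 3) then true else false

-- ===== PORT B =====
def reachesB (moves : List String) (aDir : String) (aNeed : Int) (bDir : String) (bNeed : Int) : Bool :=
  match moves with
  | [] => aNeed == 0 && bNeed == 0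
  | d :: rest =>
    if d == aDir then
      if aNeed == 0 then false else reachesB rest aDir (aNeed - 1) bDir bNeed
    else if d == bDir then
      if bNeed == 0 then false else reachesB rest aDir aNeed bDir (bNeed - 1)
    else reachesB rest aDir aNeed bDir bNeed

def robot_path_alt (destination_list : List String) : Bool :=
  reachesB destination_list "n" 2 "e" 3 || reachesB destination_list "w" 4 "n" 3

-- ===== PRECONDITION & SPEC =====
def Spec_robot_path (destination_list : List String) (out : Bool) : Prop := out = robot_path_alt destination_list
instance (destination_list : List String) (out : Bool) : Decidable (Spec_robot_path destination_list out) := by unfold Spec_robot_path; infer_instance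

-- ===== CLAIM (what is proved, stated in full; the proofs are below) =====
def Claim_equal_robot_path : Prop := ∀ (destination_list : List String), Dom_robot_path destination_list → Spec_robot_path destination_list (robot_path destination_list)

-- ===== LEMMAS AND PROOFS =====
lemma robot_path_fold (l : List String) (n s e w : Int) :
    l.foldl robotStepA (n, s, e, w)
    = (n + l.count "n", s + l.count "s", e + l.count "e", w + l.count "w") := by
  induction l generalizing n s e w with
  | nil => simp
  | cons x xs ih =>
    simp only [List.foldl_cons, List.count_cons, robotStepA, beq_iff_eq]
    by_cases h1 : x = "n"
    · subst h1; rw [if_pos rfl, ih]; simp; omega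
    · by_cases h2 : x = "s"
      · subst h2; rw [if_neg h1, if_pos rfl, ih]; simp [h1]; omega
      · by_cases h3 : x = "e"
        · subst h3; rw [if_neg h1, if_neg h2, if_pos rfl, ih]; simp [h1, h2]; omega
        · by_cases h4 : x = "w"
          · subst h4; rw [if_neg h1, if_neg h2, if_neg h3, if_pos rfl, ih]
            simp [h1, h2, h3]; omega
          · rw [if_neg h1, if_neg h2, if_neg h3, if_neg h4, ih]
            simp [h1, h2, h3, h4]

lemma reachesB_count (l : List String) (a : String) (an : Int) (b : String) (bn : Int)
    (hab : a ≠ b) (ha : 0 ≤ an) (hb : 0 ≤ bn) :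
    reachesB l a an b bn = (((l.count a : Int) == an) && ((l.count b : Int) == bn)) := by
  induction l generalizing an bn with
  | nil =>
    simp only [reachesB, List.count_nil]
    rw [Bool.eq_iff_iff]; simp; omega
  | cons x xs ih =>
    simp only [reachesB]
    by_cases h1 : x = a
    · subst h1
      rw [if_pos (by simp)]
      by_cases hz : an = 0
      · subst hz
        rw [if_pos (by simp), Bool.eq_iff_iff]
        simp [hab]
        omega
      · rw [if_neg (by simpa using hz), ih (an - 1) bn (by omega) hb, Bool.eq_iff_iff]
        simp [hab]
        omega
    · rw [if_neg (by simpa using h1)]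
      by_cases h2 : x = b
      · subst h2
        rw [if_pos (by simp)]
        by_cases hz : bn = 0
        · subst hz
          rw [if_pos (by simp), Bool.eq_iff_iff]
          simp [h1]
          omega
        · rw [if_neg (by simpa using hz), ih an (bn - 1) ha (by omega), Bool.eq_iff_iff]
          simp [h1]
          omega
      · rw [if_neg (by simpa using h2), ih an bn ha hb, Bool.eq_iff_iff]
        simp [h1, h2]

-- ===== VERDICT (by name: the statement is the Claim_ definition above) =====
theorem robot_path_spec : Claim_equal_robot_path := by
  intro l _
  unfold Spec_robot_path robot_path robot_path_alt
  rw [reachesB_count l "n" 2 "e" 3 (by decide) (by norm_num) (by norm_num),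
      reachesB_count l "w" 4 "n" 3 (by decide) (by norm_num) (by norm_num)]
  simp only [robot_path_fold]
  rw [Bool.eq_iff_iff]
  simp
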